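-- pv_equiv track=rewrite | github.com/clusslin/Rad-Loinc | src/icd10pcs_mapper.py | _select_best_icd10pcs
-- ===== SOURCE A (Python) =====
-- from typing import Dict, Optional, List, Tuple
--
-- def _select_best_icd10pcs(icd10pcs_codes: List[Tuple[str, Dict]], body_parts: List[str]) -> Tuple[str, Dict]:
--     """
--     Select the best ICD-10-PCS code from multiple matches
--
--     Prioritizes more specific anatomical terms
--
--     Args:
--         icd10pcs_codes: List of (body_part, icd10pcs_info) tuples
--         body_parts: Original list of body parts
--
--     Returns:
--         Best (body_part, icd10pcs_info) tuple
--     """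
--     if len(icd10pcs_codes) == 1:
--         return icd10pcs_codes[0]
--
--     # Priority order for specific terms
--     priority_keywords = [
--         'Cervical spine', 'Thoracic spine', 'Lumbar spine', 'Lumbosacral spine',
--         'Coronary artery', 'Carotid artery', 'Renal artery',
--         'Left', 'Right', 'Bilateral'
--     ]
--
--     # First, try priority keywords
--     for keyword in priority_keywords:
--         for body_part, icd10pcs_info in icd10pcs_codes:
--             if keyword.lower() in body_part.lower():
--                 return (body_part, icd10pcs_info)
--
--     # Prefer longer/more specific terms
--     sorted_codes = sorted(icd10pcs_codes, key=lambda x: len(x[0]), reverse=True)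
--     return sorted_codes[0]
-- ===== SOURCE B (Python) =====
-- from typing import Dict, List, Tuple
--
-- def _select_best_icd10pcs(icd10pcs_codes, body_parts):
--     if len(icd10pcs_codes) == 1:
--         return icd10pcs_codes[0]
--
--     priority_keywords = [
--         'Cervical spine', 'Thoracic spine', 'Lumbar spine', 'Lumbosacral spine',
--         'Coronary artery', 'Carotid artery', 'Renal artery',
--         'Left', 'Right', 'Bilateral'
--     ]
--
--     def rank(body_part):
--         low = body_part.lower()
--         for i, kw in enumerate(priority_keywords):
--             if kw.lower() in low:
--                 return i
--         return len(priority_keywords)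
--
--     # one pass: priority rank of every code, then argmin (first minimum wins)
--     ranks = [rank(bp) for bp, _ in icd10pcs_codes]
--     m = min(ranks, default=len(priority_keywords))
--     if m < len(priority_keywords):
--         for code, rk in zip(icd10pcs_codes, ranks):
--             if rk == m:
--                 return code
--
--     # no keyword matched anywhere: first code with the longest body part
--     best = icd10pcs_codes[0]
--     for code in icd10pcs_codes[1:]:
--         if len(code[0]) > len(best[0]):
--             best = code
--     return best
-- ===== Notes on version B (the rewrite author's own statement) =====
-- stated objective: alternative
-- what changed: A rescans the whole code list once per priority keyword and sorts for the fallback; B computes one priority rank per code, takes the argmin in a single pass, and replaces the fallback sort by a running-max loop over body-part lengths.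
-- outside the precondition, e.g. on _select_best_icd10pcs([], []): A raises IndexError, B raises IndexError
import Mathlib
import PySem

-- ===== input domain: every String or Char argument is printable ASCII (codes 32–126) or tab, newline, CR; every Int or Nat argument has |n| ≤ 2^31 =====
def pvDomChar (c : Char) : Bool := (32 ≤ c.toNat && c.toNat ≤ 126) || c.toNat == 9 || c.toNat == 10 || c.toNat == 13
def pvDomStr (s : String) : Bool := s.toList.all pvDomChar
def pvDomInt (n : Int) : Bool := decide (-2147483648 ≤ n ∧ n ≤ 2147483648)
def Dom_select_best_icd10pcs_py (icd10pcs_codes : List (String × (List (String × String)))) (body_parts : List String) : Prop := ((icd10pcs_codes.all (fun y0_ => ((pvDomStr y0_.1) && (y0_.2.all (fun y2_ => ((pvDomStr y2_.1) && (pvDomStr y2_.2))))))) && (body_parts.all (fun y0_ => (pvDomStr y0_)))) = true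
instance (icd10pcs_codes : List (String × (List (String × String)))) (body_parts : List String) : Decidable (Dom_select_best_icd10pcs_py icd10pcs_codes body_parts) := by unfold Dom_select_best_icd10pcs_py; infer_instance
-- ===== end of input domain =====

-- B replaces A's keyword-by-keyword rescans and the fallback sort by one rank per code, a single argmin pass
-- and a running-max loop (objective: alternative decomposition; same observable return value).

-- ===== PORT A =====
-- 'keyword.lower() in body_part.lower()' (shared one-liner of both Pythons)
def pvMatch (bp kw : String) : Bool := PySem.Str.isIn (PySem.Str.lower kw) (PySem.Str.lower bp)

def pvKw : List String :=
  ["Cervical spine", "Thoracic spine", "Lumbar spine", "Lumbosacral spine",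
   "Coronary artery", "Carotid artery", "Renal artery",
   "Left", "Right", "Bilateral"]

-- A's double loop: for keyword in priority_keywords: for code in codes: if match: return code
def pvFindKw : List String → List (String × (List (String × String))) → Option (String × (List (String × String)))
  | [], _ => none
  | k :: ks, codes =>
    match codes.find? (fun c => pvMatch c.1 k) with
    | some c => some c
    | none => pvFindKw ks codes

def select_best_icd10pcs_py (icd10pcs_codes : List (String × (List (String × String)))) (body_parts : List String) : String × (List (String × String)) :=
  if icd10pcs_codes.length == 1 then (PySem.List.pyGet? icd10pcs_codes 0).getD ("", [])
  else
    match pvFindKw pvKw icd10pcs_codes with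
    | some c => c
    | none =>
      (PySem.List.pyGet? (PySem.List.sorted icd10pcs_codes (fun x => PySem.Str.len x.1) true) 0).getD ("", [])

-- ===== PORT B =====
-- Source B's rank(body_part): index of the first matching priority keyword, len(priority_keywords) if none
def pvRk (kws : List String) (bp : String) : Nat := kws.findIdx (fun k => pvMatch bp k)

-- Source B's running-max fallback loop: best = codes[0]; for code in codes[1:]: if longer: best = code
def pvBest (codes : List (String × (List (String × String)))) : String × (List (String × String)) :=
  match codes with
  | [] => ("", [])
  | c :: cs => cs.foldl (fun best x => if PySem.Str.len best.1 < PySem.Str.len x.1 then x else best) c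

def select_best_icd10pcs_py_alt (icd10pcs_codes : List (String × (List (String × String)))) (body_parts : List String) : String × (List (String × String)) :=
  if icd10pcs_codes.length == 1 then (PySem.List.pyGet? icd10pcs_codes 0).getD ("", [])
  else
    let ranks := icd10pcs_codes.map (fun c => pvRk pvKw c.1)
    let m := PySem.List.minD ranks (fun r => r) pvKw.length
    if m < pvKw.length then
      match (icd10pcs_codes.zip ranks).find? (fun p => p.2 == m) with
      | some p => p.1
      | none => pvBest icd10pcs_codes
    else pvBest icd10pcs_codes

-- ===== PRECONDITION & SPEC =====
-- On icd10pcs_codes = [] A raises IndexError at sorted_codes[0] (and B's max loop would raise too): excluded.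
def Pre_select_best_icd10pcs_py (icd10pcs_codes : List (String × (List (String × String)))) (body_parts : List String) : Prop := icd10pcs_codes ≠ []
instance (icd10pcs_codes : List (String × (List (String × String)))) (body_parts : List String) : Decidable (Pre_select_best_icd10pcs_py icd10pcs_codes body_parts) := by unfold Pre_select_best_icd10pcs_py; infer_instance

def pvWitness_select_best_icd10pcs_py : (List (String × (List (String × String)))) × List String :=
  ([("Left arm", [("code", "0X600ZZ")]), ("foot", [])], ["Left arm"])

def Spec_select_best_icd10pcs_py (icd10pcs_codes : List (String × (List (String × String)))) (body_parts : List String) (out : String × (List (String × String))) : Prop := out = select_best_icd10pcs_py_alt icd10pcs_codes body_parts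
instance (icd10pcs_codes : List (String × (List (String × String)))) (body_parts : List String) (out : String × (List (String × String))) : Decidable (Spec_select_best_icd10pcs_py icd10pcs_codes body_parts out) := by unfold Spec_select_best_icd10pcs_py; infer_instance

-- ===== CLAIM (what is proved, stated in full; the proofs are below) =====
def Claim_equal_select_best_icd10pcs_py : Prop := ∀ (icd10pcs_codes : List (String × (List (String × String)))) (body_parts : List String), Dom_select_best_icd10pcs_py icd10pcs_codes body_parts → Pre_select_best_icd10pcs_py icd10pcs_codes body_parts → Spec_select_best_icd10pcs_py icd10pcs_codes body_parts (select_best_icd10pcs_py icd10pcs_codes body_parts)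

-- ===== LEMMAS AND PROOFS =====

-- the minimum rank over all codes (only used by the proofs)
def pvMv (kws : List String) (codes : List (String × (List (String × String)))) : Nat :=
  PySem.List.minD (codes.map (fun c => pvRk kws c.1)) (fun r => r) kws.length

theorem pvMvDef (kws : List String) (codes : List (String × (List (String × String)))) :
    PySem.List.minD (codes.map (fun c => pvRk kws c.1)) (fun r => r) kws.length = pvMv kws codes := rfl

theorem pvFind?_congr_mem {α : Type} {l : List α} {p q : α → Bool} (h : ∀ x ∈ l, p x = q x) :
    l.find? p = l.find? q := by
  induction l with
  | nil => rfl
  | cons a l ih =>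
    have ha := h a (by simp)
    simp only [List.find?_cons, ha]
    cases hq : q a with
    | true => rfl
    | false => exact ih (fun x hx => h x (by simp [hx]))

theorem pvZipMapFind {α β : Type} (l : List α) (f : α → β) (q : β → Bool) :
    (l.zip (l.map f)).find? (fun p => q p.2) = (l.find? (fun c => q (f c))).map (fun c => (c, f c)) := by
  induction l with
  | nil => rfl
  | cons a l ih =>
    simp only [List.map_cons, List.zip_cons_cons, List.find?_cons]
    cases hq : q (f a) <;> simp [ih]

theorem pvFoldlMinSucc (l : List Nat) (a : Nat) :
    (l.map (fun r => r + 1)).foldl Nat.min (a + 1) = (l.foldl Nat.min a) + 1 := by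
  induction l generalizing a with
  | nil => rfl
  | cons x l ih =>
    simp only [List.map_cons, List.foldl_cons]
    have h1 : (a + 1).min (x + 1) = (a.min x) + 1 := by simp [Nat.min_def]; split <;> omega
    rw [h1, ih]

theorem pvMinMapSucc (l : List Nat) :
    PySem.List.min? (l.map (fun r => r + 1)) (fun r => r) = (PySem.List.min? l (fun r => r)).map (fun r => r + 1) := by
  cases l with
  | nil => rfl
  | cons x l =>
    simp only [List.map_cons, PySem.List.min?_id_cons, Option.map_some]
    rw [pvFoldlMinSucc]

theorem pvMinZero (l : List Nat) (h : (0 : Nat) ∈ l) :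
    PySem.List.min? l (fun r => r) = some 0 := by
  cases hm : PySem.List.min? l (fun r => r) with
  | none =>
    rw [PySem.List.min?_eq_none_iff] at hm
    simp [hm] at h
  | some m =>
    have := PySem.List.min?_isMin hm 0 h
    simp [Nat.le_zero.mp this]

theorem pvMain (kws : List String) (codes : List (String × (List (String × String)))) :
    pvFindKw kws codes =
      if pvMv kws codes < kws.length then
        codes.find? (fun c => pvRk kws c.1 == pvMv kws codes)
      else none := by
  induction kws with
  | nil => simp [pvFindKw]
  | cons k ks ih =>
    cases h : codes.find? (fun c => pvMatch c.1 k) with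
    | some cf =>
      have hP : pvMatch cf.1 k = true := by simpa using List.find?_some h
      have hmem : cf ∈ codes := List.mem_of_find?_eq_some h
      have h0 : (0 : Nat) ∈ codes.map (fun x => pvRk (k :: ks) x.1) :=
        List.mem_map.mpr ⟨cf, hmem, by simp [pvRk, List.findIdx_cons, hP]⟩
      have hmv : pvMv (k :: ks) codes = 0 := by
        unfold pvMv
        simp [PySem.List.minD, pvMinZero _ h0]
      have hL : pvFindKw (k :: ks) codes = some cf := by simp [pvFindKw, h]
      have hpred : ∀ x ∈ codes, (pvRk (k :: ks) x.1 == 0) = pvMatch x.1 k := by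
        intro x hx
        cases hm : pvMatch x.1 k <;> simp [pvRk, List.findIdx_cons, hm]
      rw [hL, hmv, if_pos (by simp), pvFind?_congr_mem hpred, h]
    | none =>
      have hall : ∀ x ∈ codes, pvMatch x.1 k = false := by
        intro x hx
        simpa using List.find?_eq_none.mp h x hx
      have hL : pvFindKw (k :: ks) codes = pvFindKw ks codes := by simp [pvFindKw, h]
      have hmap : codes.map (fun x => pvRk (k :: ks) x.1) =
          (codes.map (fun x => pvRk ks x.1)).map (fun r => r + 1) := by
        rw [List.map_map]
        exact List.map_congr_left (fun x hx => by simp [pvRk, List.findIdx_cons, hall x hx])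
      have hmv : pvMv (k :: ks) codes = pvMv ks codes + 1 := by
        unfold pvMv
        rw [hmap]
        simp only [PySem.List.minD, pvMinMapSucc, List.length_cons]
        cases PySem.List.min? (codes.map fun x => pvRk ks x.1) (fun r => r) <;> simp
      rw [hL, ih, hmv]
      by_cases hlt : pvMv ks codes < ks.length
      · rw [if_pos hlt, if_pos (by simp [Nat.succ_lt_succ hlt])]
        apply pvFind?_congr_mem
        intro x hx
        simp [pvRk, List.findIdx_cons, hall x hx]
      · rw [if_neg hlt, if_neg (by simp; omega)]

theorem pvMvLtSome (kws : List String) (codes : List (String × (List (String × String))))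
    (h : pvMv kws codes < kws.length) :
    ∃ c, codes.find? (fun c => pvRk kws c.1 == pvMv kws codes) = some c := by
  cases hmm : PySem.List.min? (codes.map fun x => pvRk kws x.1) (fun r => r) with
  | none =>
    exfalso
    have : pvMv kws codes = kws.length := by unfold pvMv; simp [PySem.List.minD, hmm]
    omega
  | some m =>
    have hmv : pvMv kws codes = m := by unfold pvMv; simp [PySem.List.minD, hmm]
    have hmem : m ∈ codes.map fun x => pvRk kws x.1 := PySem.List.min?_mem hmm
    obtain ⟨c, hc, hrc⟩ := List.mem_map.mp hmem
    have : (codes.find? fun c => pvRk kws c.1 == pvMv kws codes).isSome := by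
      rw [List.find?_isSome]
      exact ⟨c, hc, by simp [hrc, hmv]⟩
    obtain ⟨c0, hc0⟩ := Option.isSome_iff_exists.mp this
    exact ⟨c0, hc0⟩

theorem pvGet0 {α : Type} (l : List α) (d : α) : (PySem.List.pyGet? l 0).getD d = l.headD d := by
  cases l <;> simp [PySem.List.pyGet?, PySem.List.pyIdx?]

theorem pvFoldlInsertByHead {α : Type} (bef : α → α → Bool) (cs : List α) (acc : List α)
    (hacc : acc ≠ []) (d : α) :
    (cs.foldl (fun a x => PySem.List.insertBy bef x a) acc).headD d =
      cs.foldl (fun b x => if bef x b then x else b) (acc.headD d) := by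
  induction cs generalizing acc with
  | nil => rfl
  | cons x cs ih =>
    cases acc with
    | nil => exact absurd rfl hacc
    | cons y ys =>
      simp only [List.foldl_cons]
      cases hb : bef x y <;>
        simp only [PySem.List.insertBy, hb] <;>
        rw [ih _ (by simp)] <;> simp [hb]

theorem pvSortedRevHead (key : (String × (List (String × String))) → Int)
    (c : String × (List (String × String))) (cs : List (String × (List (String × String)))) (d : String × (List (String × String))) :
    (PySem.List.sorted (c :: cs) key true).headD d =
      cs.foldl (fun b x => if key b < key x then x else b) c := by
  rw [PySem.List.sorted_rev_eq_foldl_insertBy]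
  simp only [List.foldl_cons]
  rw [pvFoldlInsertByHead _ _ _ (by simp [PySem.List.insertBy])]
  simp only [PySem.List.insertBy, List.headD_cons]
  congr 1
  funext b x
  simp

-- ===== VERDICT (by name: the statement is the Claim_ definition above) =====
theorem select_best_icd10pcs_py_spec : Claim_equal_select_best_icd10pcs_py := by
  intro codes bps hdom hpre
  unfold Spec_select_best_icd10pcs_py
  by_cases h1 : codes.length = 1
  · simp [select_best_icd10pcs_py, select_best_icd10pcs_py_alt, h1]
  · have hb : (codes.length == 1) = false := by simpa using h1
    obtain ⟨c, cs, rfl⟩ : ∃ c cs, codes = c :: cs := by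
      cases codes with
      | nil => exact absurd rfl hpre
      | cons c cs => exact ⟨c, cs, rfl⟩
    rw [select_best_icd10pcs_py, select_best_icd10pcs_py_alt]
    simp only [hb, Bool.false_eq_true, if_false]
    rw [pvMain]
    by_cases hm : pvMv pvKw (c :: cs) < pvKw.length
    · obtain ⟨c0, hf⟩ := pvMvLtSome pvKw (c :: cs) hm
      rw [if_pos hm, hf, pvMvDef, if_pos hm,
        pvZipMapFind (c :: cs) (fun x => pvRk pvKw x.1) (fun y => y == pvMv pvKw (c :: cs)), hf]
      rfl
    · rw [if_neg hm, pvMvDef, if_neg hm]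
      show (PySem.List.pyGet? (PySem.List.sorted (c :: cs) (fun x => PySem.Str.len x.1) true) 0).getD ("", []) = pvBest (c :: cs)
      rw [pvGet0]
      exact pvSortedRevHead (fun x => PySem.Str.len x.1) c cs ("", [])
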